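-- pv_equiv track=rewrite | github.com/borget-5202/24PointGame | game24/play_24pt.py | explain_multiset_mismatch
-- ===== SOURCE A (Python) =====
-- from typing import Dict, Any, List
--
-- def explain_multiset_mismatch(need: List[int], used: List[int]) -> str:
--     from collections import Counter
--     need_c, used_c = Counter(need), Counter(used)
--     extra, missing = [], []
--     for k in sorted(set(list(need_c.keys()) + list(used_c.keys()))):
--         diff = used_c[k] - need_c[k]
--         if diff > 0:
--             extra.append(f"{k}x{diff}")
--         elif diff < 0:
--             missing.append(f"{k}x{-diff}")
--     out = []
--     if missing: out.append("missing " + ", ".join(missing))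
--     if extra:   out.append("extra " + ", ".join(extra))
--     return "; ".join(out) if out else "numbers mismatch"
-- ===== SOURCE B (Python) =====
-- def explain_multiset_mismatch(need, used):
--     a, b = sorted(need), sorted(used)
--     i, j, missing, extra = 0, 0, [], []
--     while i < len(a) or j < len(b):
--         if j >= len(b) or (i < len(a) and a[i] < b[j]):
--             k, c = a[i], 1
--             i += 1
--             while i < len(a) and a[i] == k:
--                 c += 1; i += 1
--             missing.append(f"{k}x{c}")
--         elif i >= len(a) or b[j] < a[i]:
--             k, c = b[j], 1
--             j += 1
--             while j < len(b) and b[j] == k: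
--                 c += 1; j += 1
--             extra.append(f"{k}x{c}")
--         else:
--             k, ca, cb = a[i], 1, 1
--             i += 1; j += 1
--             while i < len(a) and a[i] == k:
--                 ca += 1; i += 1
--             while j < len(b) and b[j] == k:
--                 cb += 1; j += 1
--             d = cb - ca
--             if d > 0:
--                 extra.append(f"{k}x{d}")
--             elif d < 0:
--                 missing.append(f"{k}x{-d}")
--     parts = []
--     if missing: parts.append("missing " + ", ".join(missing))
--     if extra:   parts.append("extra " + ", ".join(extra))
--     return "; ".join(parts) if parts else "numbers mismatch"
-- ===== Notes on version B (the rewrite author's own statement) =====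
-- stated objective: alternative
-- what changed: Replaces A's Counter-based union-key loop by a sort-then-merge algorithm: both lists are sorted and scanned once with two pointers, consuming equal runs and emitting missing/extra entries directly in key order, with no Counter or key-union set at all.
import Mathlib
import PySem

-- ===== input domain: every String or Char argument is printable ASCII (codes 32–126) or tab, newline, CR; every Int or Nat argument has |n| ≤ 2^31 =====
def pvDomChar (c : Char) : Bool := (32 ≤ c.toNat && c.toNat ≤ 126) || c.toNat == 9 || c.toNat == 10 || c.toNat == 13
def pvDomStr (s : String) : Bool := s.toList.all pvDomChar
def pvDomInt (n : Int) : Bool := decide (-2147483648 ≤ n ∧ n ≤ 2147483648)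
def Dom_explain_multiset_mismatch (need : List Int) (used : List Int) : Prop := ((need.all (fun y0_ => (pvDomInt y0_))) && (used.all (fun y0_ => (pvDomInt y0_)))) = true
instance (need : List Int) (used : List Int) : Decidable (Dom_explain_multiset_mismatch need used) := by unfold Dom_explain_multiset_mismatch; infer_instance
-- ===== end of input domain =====

-- B replaces A's Counter-over-union-keys loop by sort-then-merge: both lists are sorted and
-- scanned once with two pointers, consuming equal runs and emitting entries in key order
-- (objective: alternative — no Counter, no key-union set).

-- ===== PORT A =====
def explain_multiset_mismatch (need : List Int) (used : List Int) : String :=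
  let need_c := PySem.Dict.counter need
  let used_c := PySem.Dict.counter used
  let lists :=
    (PySem.List.sorted (PySem.Set.ofList (need_c.keys ++ used_c.keys)) (fun x => x)).foldl
      (fun (acc : List String × List String) k =>
        let diff := used_c.getD k 0 - need_c.getD k 0
        if diff > 0 then (acc.1 ++ [PySem.Int.toStr k ++ "x" ++ PySem.Int.toStr diff], acc.2)
        else if diff < 0 then (acc.1, acc.2 ++ [PySem.Int.toStr k ++ "x" ++ PySem.Int.toStr (-diff)])
        else acc) ([], [])
  let out : List String :=
    (if lists.2 ≠ [] then ["missing " ++ PySem.Str.join ", " lists.2] else []) ++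
    (if lists.1 ≠ [] then ["extra " ++ PySem.Str.join ", " lists.1] else [])
  if out ≠ [] then PySem.Str.join "; " out else "numbers mismatch"

-- ===== PORT B =====
-- f"{k}x{c}"
def pvFmt (k c : Int) : String := PySem.Int.toStr k ++ "x" ++ PySem.Int.toStr c

-- the inner 'while … == k' run-consuming loop: (extra count consumed, remaining suffix)
def pvTakeRun (k : Int) : List Int → Nat × List Int
  | [] => (0, [])
  | x :: rest =>
      if x = k then
        let p := pvTakeRun k rest
        (p.1 + 1, p.2)
      else (0, x :: rest)

theorem pvTakeRun_length_le (k : Int) (xs : List Int) : (pvTakeRun k xs).2.length ≤ xs.length := by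
  induction xs with
  | nil => simp [pvTakeRun]
  | cons x rest ih =>
    simp only [pvTakeRun]
    split_ifs <;> simp <;> omega

-- the outer while over the two sorted suffixes; returns (missing, extra)
def pvMerge : List Int → List Int → List String × List String
  | [], [] => ([], [])
  | x :: a', [] =>
      let p := pvTakeRun x a'
      let r := pvMerge p.2 []
      (pvFmt x ((p.1 : Int) + 1) :: r.1, r.2)
  | [], y :: b' =>
      let p := pvTakeRun y b'
      let r := pvMerge [] p.2
      (r.1, pvFmt y ((p.1 : Int) + 1) :: r.2)
  | x :: a', y :: b' =>
      if x < y then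
        let p := pvTakeRun x a'
        let r := pvMerge p.2 (y :: b')
        (pvFmt x ((p.1 : Int) + 1) :: r.1, r.2)
      else if y < x then
        let p := pvTakeRun y b'
        let r := pvMerge (x :: a') p.2
        (r.1, pvFmt y ((p.1 : Int) + 1) :: r.2)
      else
        let pa := pvTakeRun x a'
        let pb := pvTakeRun x b'
        let d : Int := ((pb.1 : Int) + 1) - ((pa.1 : Int) + 1)
        let r := pvMerge pa.2 pb.2
        if d > 0 then (r.1, pvFmt x d :: r.2)
        else if d < 0 then (pvFmt x (-d) :: r.1, r.2)
        else r
termination_by a b => a.length + b.length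
decreasing_by
  all_goals
    first
      | (have h1 := pvTakeRun_length_le x a'; have h2 := pvTakeRun_length_le x b'; simp_all; all_goals omega)
      | (have h1 := pvTakeRun_length_le x a'; simp_all; all_goals omega)
      | (have h1 := pvTakeRun_length_le y b'; simp_all; all_goals omega)

def explain_multiset_mismatch_alt (need : List Int) (used : List Int) : String :=
  let a := PySem.List.sorted need (fun x => x)
  let b := PySem.List.sorted used (fun x => x)
  let me := pvMerge a b
  let parts : List String :=
    (if me.1 ≠ [] then ["missing " ++ PySem.Str.join ", " me.1] else []) ++
    (if me.2 ≠ [] then ["extra " ++ PySem.Str.join ", " me.2] else [])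
  if parts ≠ [] then PySem.Str.join "; " parts else "numbers mismatch"

-- ===== PRECONDITION & SPEC =====
def Spec_explain_multiset_mismatch (need : List Int) (used : List Int) (out : String) : Prop := out = explain_multiset_mismatch_alt need used
instance (need : List Int) (used : List Int) (out : String) : Decidable (Spec_explain_multiset_mismatch need used out) := by unfold Spec_explain_multiset_mismatch; infer_instance

-- ===== CLAIM (what is proved, stated in full; the proofs are below) =====
def Claim_equal_explain_multiset_mismatch : Prop := ∀ (need : List Int) (used : List Int), Dom_explain_multiset_mismatch need used → Spec_explain_multiset_mismatch need used (explain_multiset_mismatch need used)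

-- ===== LEMMAS AND PROOFS =====

-- A's union-key loop splits into two filter/map passes.
theorem pvFoldAB (cu cn : Int → Int) (ks : List Int) (e m : List String) :
    ks.foldl
      (fun (acc : List String × List String) k =>
        let diff := cu k - cn k
        if diff > 0 then (acc.1 ++ [PySem.Int.toStr k ++ "x" ++ PySem.Int.toStr diff], acc.2)
        else if diff < 0 then (acc.1, acc.2 ++ [PySem.Int.toStr k ++ "x" ++ PySem.Int.toStr (-diff)])
        else acc) (e, m)
    = (e ++ (ks.filter (fun k => decide (cu k - cn k > 0))).map
          (fun k => PySem.Int.toStr k ++ "x" ++ PySem.Int.toStr (cu k - cn k)),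
       m ++ (ks.filter (fun k => decide (cu k - cn k < 0))).map
          (fun k => PySem.Int.toStr k ++ "x" ++ PySem.Int.toStr (-(cu k - cn k)))) := by
  induction ks generalizing e m with
  | nil => simp
  | cons k ks ih =>
    simp only [List.foldl_cons, List.filter_cons]
    split_ifs with h1 h2 <;> simp_all <;> omega

-- pvTakeRun on a sorted suffix: full run count, sorted strictly-larger remainder, counts preserved
theorem pvTakeRun_sorted (x : Int) (a' : List Int)
    (hle : ∀ y ∈ a', x ≤ y) (hs : a'.Pairwise (· ≤ ·)) :
    (pvTakeRun x a').1 = a'.count x ∧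
    (pvTakeRun x a').2.Pairwise (· ≤ ·) ∧
    (∀ y ∈ (pvTakeRun x a').2, x < y) ∧
    (∀ k, (pvTakeRun x a').2.count k = if k = x then 0 else a'.count k) := by
  induction a' with
  | nil => simp [pvTakeRun]
  | cons z rest ih =>
    rcases List.pairwise_cons.mp hs with ⟨hz, hrest⟩
    by_cases hzx : z = x
    · subst hzx
      have hle' : ∀ y ∈ rest, z ≤ y := hz
      obtain ⟨h1, h2, h3, h4⟩ := ih hle' hrest
      have e : pvTakeRun z (z :: rest) = ((pvTakeRun z rest).1 + 1, (pvTakeRun z rest).2) := by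
        simp [pvTakeRun]
      refine ⟨?_, ?_, ?_, ?_⟩
      · rw [e]; simp [h1]
      · rw [e]; exact h2
      · rw [e]; exact h3
      · intro k
        rw [e]
        have hk4 := h4 k
        by_cases hk : k = z
        · simp [hk] at hk4 ⊢; simpa [hk] using hk4
        · have hzk : ¬ z = k := fun h => hk h.symm
          simp [hk4, hk, hzk]
    · have hxz : x < z := lt_of_le_of_ne (hle z (by simp)) (fun h => hzx h.symm)
      have hnot : ∀ y ∈ z :: rest, x < y := by
        intro y hy
        rcases List.mem_cons.mp hy with h | h
        · omega
        · exact lt_of_lt_of_le hxz (hz y h)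
      refine ⟨?_, ?_, ?_, ?_⟩
      · simp only [pvTakeRun, if_neg hzx]
        have : x ∉ z :: rest := fun h => absurd (hnot x h) (lt_irrefl x)
        simp [List.count_eq_zero_of_not_mem this]
      · simpa [pvTakeRun, hzx] using hs
      · simpa [pvTakeRun, hzx] using hnot
      · intro k
        simp only [pvTakeRun, if_neg hzx]
        by_cases hk : k = x
        · have hxm : x ∉ z :: rest := fun h => absurd (hnot x h) (lt_irrefl x)
          simp [hk, List.count_eq_zero_of_not_mem hxm]
        · simp [hk]

-- a strictly sorted list whose minimum is x decomposes as x :: tail of larger elements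
theorem pvHeadMin (U : List Int) (x : Int) (hU : U.Pairwise (· < ·)) (hx : x ∈ U)
    (hmin : ∀ k ∈ U, x ≤ k) :
    ∃ U', U = x :: U' ∧ U'.Pairwise (· < ·) ∧ (∀ k ∈ U', x < k) := by
  cases U with
  | nil => cases hx
  | cons u U' =>
    rcases List.pairwise_cons.mp hU with ⟨hu, hU'⟩
    have hxu : x ≤ u → u ≤ x → u = x := fun h1 h2 => le_antisymm h2 h1
    have hux : u = x := by
      rcases List.mem_cons.mp hx with h | h
      · exact h.symm
      · exact absurd (hmin u (by simp)) (not_le.mpr (hu x h))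
    subst hux
    exact ⟨U', rfl, hU', hu⟩

-- congruence of the missing pass over the tail keys
theorem pvPassNeg_congr (U' : List Int) (f g : Int → Int) (h : ∀ k ∈ U', f k = g k) :
    (U'.filter (fun k => decide (f k < 0))).map (fun k => pvFmt k (-(f k)))
  = (U'.filter (fun k => decide (g k < 0))).map (fun k => pvFmt k (-(g k))) := by
  rw [List.filter_congr (fun k hk => by rw [h k hk] :
    ∀ k ∈ U', (decide (f k < 0)) = (decide (g k < 0)))]
  exact List.map_congr_left (fun k hk => by rw [h k (List.mem_filter.mp hk).1])

-- congruence of the extra pass over the tail keys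
theorem pvPassPos_congr (U' : List Int) (f g : Int → Int) (h : ∀ k ∈ U', f k = g k) :
    (U'.filter (fun k => decide (f k > 0))).map (fun k => pvFmt k (f k))
  = (U'.filter (fun k => decide (g k > 0))).map (fun k => pvFmt k (g k)) := by
  rw [List.filter_congr (fun k hk => by rw [h k hk] :
    ∀ k ∈ U', (decide (f k > 0)) = (decide (g k > 0)))]
  exact List.map_congr_left (fun k hk => by rw [h k (List.mem_filter.mp hk).1])

-- membership of the remainder of a run, for keys other than the run key
theorem pvRunMem (x : Int) (a' : List Int) (hle : ∀ y ∈ a', x ≤ y)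
    (hs : a'.Pairwise (· ≤ ·)) (k : Int) (hk : k ≠ x) :
    k ∈ (pvTakeRun x a').2 ↔ k ∈ x :: a' := by
  have h4 := (pvTakeRun_sorted x a' hle hs).2.2.2 k
  rw [if_neg hk] at h4
  have hxk : ¬ x = k := fun h => hk h.symm
  simp [← List.count_pos_iff, h4, hxk]

-- counts of the remainder of a run, for keys other than the run key
theorem pvRunCount (x : Int) (a' : List Int) (hle : ∀ y ∈ a', x ≤ y)
    (hs : a'.Pairwise (· ≤ ·)) (k : Int) (hk : k ≠ x) :
    List.count k (pvTakeRun x a').2 = List.count k (x :: a') := by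
  have h4 := (pvTakeRun_sorted x a' hle hs).2.2.2 k
  rw [if_neg hk] at h4
  have hxk : ¬ x = k := fun h => hk h.symm
  simp [h4, hxk]

-- tail membership: removing the minimum key from the union removes its runs from both lists
theorem pvMemTail (x : Int) (a b U' ra rb : List Int)
    (hmemU : ∀ k, k ∈ x :: U' ↔ k ∈ a ∨ k ∈ b)
    (hgtU' : ∀ k ∈ U', x < k)
    (hA : ∀ k, k ≠ x → (k ∈ ra ↔ k ∈ a)) (hB : ∀ k, k ≠ x → (k ∈ rb ↔ k ∈ b))
    (hra : ∀ k ∈ ra, x < k) (hrb : ∀ k ∈ rb, x < k) :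
    ∀ k, k ∈ U' ↔ k ∈ ra ∨ k ∈ rb := by
  intro k
  constructor
  · intro hk
    have hkx : k ≠ x := ne_of_gt (hgtU' k hk)
    rcases (hmemU k).mp (by simp [hk]) with h | h
    · exact Or.inl ((hA k hkx).mpr h)
    · exact Or.inr ((hB k hkx).mpr h)
  · intro hk
    have hkx : k ≠ x := by
      rcases hk with h | h
      · exact ne_of_gt (hra k h)
      · exact ne_of_gt (hrb k h)
    have : k ∈ x :: U' := (hmemU k).mpr (by
      rcases hk with h | h
      · exact Or.inl ((hA k hkx).mp h)
      · exact Or.inr ((hB k hkx).mp h))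
    rcases List.mem_cons.mp this with h | h
    · exact absurd h hkx
    · exact h

-- the merge on sorted inputs computes A's two filter/map passes over any strictly sorted key union
theorem pvMerge_spec (a b : List Int) (U : List Int)
    (ha : a.Pairwise (· ≤ ·)) (hb : b.Pairwise (· ≤ ·))
    (hU : U.Pairwise (· < ·)) (hmem : ∀ k, k ∈ U ↔ k ∈ a ∨ k ∈ b) :
    pvMerge a b =
      ((U.filter (fun k => decide ((b.count k : Int) - (a.count k : Int) < 0))).map
         (fun k => pvFmt k (-((b.count k : Int) - (a.count k : Int)))),
       (U.filter (fun k => decide ((b.count k : Int) - (a.count k : Int) > 0))).map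
         (fun k => pvFmt k ((b.count k : Int) - (a.count k : Int)))) := by
  revert ha hb hU hmem
  induction a, b using pvMerge.induct generalizing U with
  | case1 =>
    intro _ _ _ HM
    cases U with
    | nil => simp [pvMerge]
    | cons u t => exact absurd ((HM u).mp (by simp)) (by simp)
  | case2 x a' p ih1 =>
    intro HA HB HU HM
    rcases List.pairwise_cons.mp HA with ⟨hxa, ha'⟩
    obtain ⟨hc1, hps, hpgt, hcnt⟩ := pvTakeRun_sorted x a' hxa ha'
    have hxU : x ∈ U := (HM x).mpr (Or.inl (by simp))
    have hmin : ∀ k ∈ U, x ≤ k := by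
      intro k hk
      rcases (HM k).mp hk with h | h
      · rcases List.mem_cons.mp h with h | h
        · exact le_of_eq h.symm
        · exact hxa k h
      · simp at h
    obtain ⟨U', hUeq, hU', hgtU'⟩ := pvHeadMin U x HU hxU hmin
    subst hUeq
    have hmem' : ∀ k, k ∈ U' ↔ k ∈ (pvTakeRun x a').2 ∨ k ∈ ([] : List Int) :=
      pvMemTail x (x :: a') [] U' (pvTakeRun x a').2 [] HM hgtU'
        (fun k hk => pvRunMem x a' hxa ha' k hk) (fun k _ => Iff.rfl) hpgt (by simp)
    have hrec := ih1 U' hps List.Pairwise.nil hU' hmem'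
    have hcong : ∀ k ∈ U',
        ((List.count k ([] : List Int) : Int) - (List.count k (x :: a') : Int))
          = ((List.count k ([] : List Int) : Int) - (List.count k (pvTakeRun x a').2 : Int)) := by
      intro k hk
      rw [pvRunCount x a' hxa ha' k (ne_of_gt (hgtU' k hk))]
    have hfx : ((List.count x ([] : List Int) : Int) - (List.count x (x :: a') : Int))
        = -(((pvTakeRun x a').1 : Int) + 1) := by
      simp [List.count_cons_self, hc1]
    simp only [pvMerge]
    rw [hrec, List.filter_cons, List.filter_cons,
        if_pos (by rw [decide_eq_true_eq, hfx]; omega),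
        if_neg (by rw [decide_eq_true_eq, hfx]; omega),
        List.map_cons,
        pvPassNeg_congr U' _ _ hcong, pvPassPos_congr U' _ _ hcong, hfx, neg_neg]
  | case3 y b' p ih1 =>
    intro HA HB HU HM
    rcases List.pairwise_cons.mp HB with ⟨hyb, hb'⟩
    obtain ⟨hc1, hps, hpgt, hcnt⟩ := pvTakeRun_sorted y b' hyb hb'
    have hyU : y ∈ U := (HM y).mpr (Or.inr (by simp))
    have hmin : ∀ k ∈ U, y ≤ k := by
      intro k hk
      rcases (HM k).mp hk with h | h
      · simp at h
      · rcases List.mem_cons.mp h with h | h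
        · exact le_of_eq h.symm
        · exact hyb k h
    obtain ⟨U', hUeq, hU', hgtU'⟩ := pvHeadMin U y HU hyU hmin
    subst hUeq
    have hmem' : ∀ k, k ∈ U' ↔ k ∈ ([] : List Int) ∨ k ∈ (pvTakeRun y b').2 :=
      pvMemTail y [] (y :: b') U' [] (pvTakeRun y b').2 HM hgtU'
        (fun k _ => Iff.rfl) (fun k hk => pvRunMem y b' hyb hb' k hk) (by simp) hpgt
    have hrec := ih1 U' List.Pairwise.nil hps hU' hmem'
    have hcong : ∀ k ∈ U',
        ((List.count k (y :: b') : Int) - (List.count k ([] : List Int) : Int))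
          = ((List.count k (pvTakeRun y b').2 : Int) - (List.count k ([] : List Int) : Int)) := by
      intro k hk
      rw [pvRunCount y b' hyb hb' k (ne_of_gt (hgtU' k hk))]
    have hfy : ((List.count y (y :: b') : Int) - (List.count y ([] : List Int) : Int))
        = (((pvTakeRun y b').1 : Int) + 1) := by
      simp [List.count_cons_self, hc1]
    simp only [pvMerge]
    rw [hrec, List.filter_cons, List.filter_cons,
        if_neg (by rw [decide_eq_true_eq, hfy]; omega),
        if_pos (by rw [decide_eq_true_eq, hfy]; omega),
        List.map_cons,
        pvPassNeg_congr U' _ _ hcong, pvPassPos_congr U' _ _ hcong, hfy]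
  | case4 x a' y b' hxy p ih1 =>
    intro HA HB HU HM
    rcases List.pairwise_cons.mp HA with ⟨hxa, ha'⟩
    rcases List.pairwise_cons.mp HB with ⟨hyb, hb'⟩
    obtain ⟨hc1, hps, hpgt, hcnt⟩ := pvTakeRun_sorted x a' hxa ha'
    have hbx : ∀ k ∈ y :: b', x < k := by
      intro k hk
      rcases List.mem_cons.mp hk with h | h
      · exact h ▸ hxy
      · exact lt_of_lt_of_le hxy (hyb k h)
    have hcbx : List.count x (y :: b') = 0 :=
      List.count_eq_zero_of_not_mem (fun h => lt_irrefl x (hbx x h))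
    have hxU : x ∈ U := (HM x).mpr (Or.inl (by simp))
    have hmin : ∀ k ∈ U, x ≤ k := by
      intro k hk
      rcases (HM k).mp hk with h | h
      · rcases List.mem_cons.mp h with h | h
        · exact le_of_eq h.symm
        · exact hxa k h
      · exact le_of_lt (hbx k h)
    obtain ⟨U', hUeq, hU', hgtU'⟩ := pvHeadMin U x HU hxU hmin
    subst hUeq
    have hmem' : ∀ k, k ∈ U' ↔ k ∈ (pvTakeRun x a').2 ∨ k ∈ y :: b' :=
      pvMemTail x (x :: a') (y :: b') U' (pvTakeRun x a').2 (y :: b') HM hgtU'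
        (fun k hk => pvRunMem x a' hxa ha' k hk) (fun k _ => Iff.rfl) hpgt hbx
    have hrec := ih1 U' hps HB hU' hmem'
    have hcong : ∀ k ∈ U',
        ((List.count k (y :: b') : Int) - (List.count k (x :: a') : Int))
          = ((List.count k (y :: b') : Int) - (List.count k (pvTakeRun x a').2 : Int)) := by
      intro k hk
      rw [pvRunCount x a' hxa ha' k (ne_of_gt (hgtU' k hk))]
    have hfx : ((List.count x (y :: b') : Int) - (List.count x (x :: a') : Int))
        = -(((pvTakeRun x a').1 : Int) + 1) := by
      simp [List.count_cons_self, hc1, hcbx]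
    simp only [pvMerge, if_pos hxy]
    rw [hrec, List.filter_cons, List.filter_cons,
        if_pos (by rw [decide_eq_true_eq, hfx]; omega),
        if_neg (by rw [decide_eq_true_eq, hfx]; omega),
        List.map_cons,
        pvPassNeg_congr U' _ _ hcong, pvPassPos_congr U' _ _ hcong, hfx, neg_neg]
  | case5 x a' y b' hxy hyx p ih1 =>
    intro HA HB HU HM
    rcases List.pairwise_cons.mp HA with ⟨hxa, ha'⟩
    rcases List.pairwise_cons.mp HB with ⟨hyb, hb'⟩
    obtain ⟨hc1, hps, hpgt, hcnt⟩ := pvTakeRun_sorted y b' hyb hb'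
    have hay : ∀ k ∈ x :: a', y < k := by
      intro k hk
      rcases List.mem_cons.mp hk with h | h
      · exact h ▸ hyx
      · exact lt_of_lt_of_le hyx (hxa k h)
    have hcay : List.count y (x :: a') = 0 :=
      List.count_eq_zero_of_not_mem (fun h => lt_irrefl y (hay y h))
    have hyU : y ∈ U := (HM y).mpr (Or.inr (by simp))
    have hmin : ∀ k ∈ U, y ≤ k := by
      intro k hk
      rcases (HM k).mp hk with h | h
      · exact le_of_lt (hay k h)
      · rcases List.mem_cons.mp h with h | h
        · exact le_of_eq h.symm
        · exact hyb k h
    obtain ⟨U', hUeq, hU', hgtU'⟩ := pvHeadMin U y HU hyU hmin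
    subst hUeq
    have hmem' : ∀ k, k ∈ U' ↔ k ∈ x :: a' ∨ k ∈ (pvTakeRun y b').2 :=
      pvMemTail y (x :: a') (y :: b') U' (x :: a') (pvTakeRun y b').2 HM hgtU'
        (fun k _ => Iff.rfl) (fun k hk => pvRunMem y b' hyb hb' k hk) hay hpgt
    have hrec := ih1 U' HA hps hU' hmem'
    have hcong : ∀ k ∈ U',
        ((List.count k (y :: b') : Int) - (List.count k (x :: a') : Int))
          = ((List.count k (pvTakeRun y b').2 : Int) - (List.count k (x :: a') : Int)) := by
      intro k hk
      rw [pvRunCount y b' hyb hb' k (ne_of_gt (hgtU' k hk))]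
    have hfy : ((List.count y (y :: b') : Int) - (List.count y (x :: a') : Int))
        = (((pvTakeRun y b').1 : Int) + 1) := by
      simp [List.count_cons_self, hc1, hcay]
    simp only [pvMerge, if_neg hxy, if_pos hyx]
    rw [hrec, List.filter_cons, List.filter_cons,
        if_neg (by rw [decide_eq_true_eq, hfy]; omega),
        if_pos (by rw [decide_eq_true_eq, hfy]; omega),
        List.map_cons,
        pvPassNeg_congr U' _ _ hcong, pvPassPos_congr U' _ _ hcong, hfy]
  | case6 x a' y b' hxy hyx pa pb d hd ih1 =>
    intro HA HB HU HM
    have hxyeq : x = y := le_antisymm (not_lt.mp hyx) (not_lt.mp hxy)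
    subst hxyeq
    rcases List.pairwise_cons.mp HA with ⟨hxa, ha'⟩
    rcases List.pairwise_cons.mp HB with ⟨hxb, hb'⟩
    obtain ⟨hca, hpsa, hpgta, hcnta⟩ := pvTakeRun_sorted x a' hxa ha'
    obtain ⟨hcb, hpsb, hpgtb, hcntb⟩ := pvTakeRun_sorted x b' hxb hb'
    have hxU : x ∈ U := (HM x).mpr (Or.inl (by simp))
    have hmin : ∀ k ∈ U, x ≤ k := by
      intro k hk
      rcases (HM k).mp hk with h | h <;> rcases List.mem_cons.mp h with h | h
      · exact le_of_eq h.symm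
      · exact hxa k h
      · exact le_of_eq h.symm
      · exact hxb k h
    obtain ⟨U', hUeq, hU', hgtU'⟩ := pvHeadMin U x HU hxU hmin
    subst hUeq
    have hmem' : ∀ k, k ∈ U' ↔ k ∈ (pvTakeRun x a').2 ∨ k ∈ (pvTakeRun x b').2 :=
      pvMemTail x (x :: a') (x :: b') U' _ _ HM hgtU'
        (fun k hk => pvRunMem x a' hxa ha' k hk)
        (fun k hk => pvRunMem x b' hxb hb' k hk) hpgta hpgtb
    have hrec := ih1 U' hpsa hpsb hU' hmem'
    have hcong : ∀ k ∈ U',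
        ((List.count k (x :: b') : Int) - (List.count k (x :: a') : Int))
          = ((List.count k (pvTakeRun x b').2 : Int) - (List.count k (pvTakeRun x a').2 : Int)) := by
      intro k hk
      rw [pvRunCount x a' hxa ha' k (ne_of_gt (hgtU' k hk)),
          pvRunCount x b' hxb hb' k (ne_of_gt (hgtU' k hk))]
    have hfx : ((List.count x (x :: b') : Int) - (List.count x (x :: a') : Int))
        = (((pvTakeRun x b').1 : Int) + 1) - (((pvTakeRun x a').1 : Int) + 1) := by
      simp [List.count_cons_self, hca, hcb]
    have hd' : (((pvTakeRun x b').1 : Int) + 1) - (((pvTakeRun x a').1 : Int) + 1) > 0 := hd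
    simp only [pvMerge, if_neg hxy]
    rw [if_pos hd', hrec, List.filter_cons, List.filter_cons,
        if_neg (by rw [decide_eq_true_eq, hfx]; omega),
        if_pos (by rw [decide_eq_true_eq, hfx]; omega),
        List.map_cons,
        pvPassNeg_congr U' _ _ hcong, pvPassPos_congr U' _ _ hcong, hfx]
  | case7 x a' y b' hxy hyx pa pb d hd1 hd2 ih1 =>
    intro HA HB HU HM
    have hxyeq : x = y := le_antisymm (not_lt.mp hyx) (not_lt.mp hxy)
    subst hxyeq
    rcases List.pairwise_cons.mp HA with ⟨hxa, ha'⟩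
    rcases List.pairwise_cons.mp HB with ⟨hxb, hb'⟩
    obtain ⟨hca, hpsa, hpgta, hcnta⟩ := pvTakeRun_sorted x a' hxa ha'
    obtain ⟨hcb, hpsb, hpgtb, hcntb⟩ := pvTakeRun_sorted x b' hxb hb'
    have hxU : x ∈ U := (HM x).mpr (Or.inl (by simp))
    have hmin : ∀ k ∈ U, x ≤ k := by
      intro k hk
      rcases (HM k).mp hk with h | h <;> rcases List.mem_cons.mp h with h | h
      · exact le_of_eq h.symm
      · exact hxa k h
      · exact le_of_eq h.symm
      · exact hxb k h
    obtain ⟨U', hUeq, hU', hgtU'⟩ := pvHeadMin U x HU hxU hmin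
    subst hUeq
    have hmem' : ∀ k, k ∈ U' ↔ k ∈ (pvTakeRun x a').2 ∨ k ∈ (pvTakeRun x b').2 :=
      pvMemTail x (x :: a') (x :: b') U' _ _ HM hgtU'
        (fun k hk => pvRunMem x a' hxa ha' k hk)
        (fun k hk => pvRunMem x b' hxb hb' k hk) hpgta hpgtb
    have hrec := ih1 U' hpsa hpsb hU' hmem'
    have hcong : ∀ k ∈ U',
        ((List.count k (x :: b') : Int) - (List.count k (x :: a') : Int))
          = ((List.count k (pvTakeRun x b').2 : Int) - (List.count k (pvTakeRun x a').2 : Int)) := by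
      intro k hk
      rw [pvRunCount x a' hxa ha' k (ne_of_gt (hgtU' k hk)),
          pvRunCount x b' hxb hb' k (ne_of_gt (hgtU' k hk))]
    have hfx : ((List.count x (x :: b') : Int) - (List.count x (x :: a') : Int))
        = (((pvTakeRun x b').1 : Int) + 1) - (((pvTakeRun x a').1 : Int) + 1) := by
      simp [List.count_cons_self, hca, hcb]
    have hd1' : ¬ ((((pvTakeRun x b').1 : Int) + 1) - (((pvTakeRun x a').1 : Int) + 1) > 0) := hd1
    have hd2' : (((pvTakeRun x b').1 : Int) + 1) - (((pvTakeRun x a').1 : Int) + 1) < 0 := hd2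
    simp only [pvMerge, if_neg hxy]
    rw [if_neg hd1', if_pos hd2', hrec, List.filter_cons, List.filter_cons,
        if_pos (by rw [decide_eq_true_eq, hfx]; omega),
        if_neg (by rw [decide_eq_true_eq, hfx]; omega),
        List.map_cons,
        pvPassNeg_congr U' _ _ hcong, pvPassPos_congr U' _ _ hcong, hfx]
  | case8 x a' y b' hxy hyx pa pb d hd1 hd2 ih1 =>
    intro HA HB HU HM
    have hxyeq : x = y := le_antisymm (not_lt.mp hyx) (not_lt.mp hxy)
    subst hxyeq
    rcases List.pairwise_cons.mp HA with ⟨hxa, ha'⟩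
    rcases List.pairwise_cons.mp HB with ⟨hxb, hb'⟩
    obtain ⟨hca, hpsa, hpgta, hcnta⟩ := pvTakeRun_sorted x a' hxa ha'
    obtain ⟨hcb, hpsb, hpgtb, hcntb⟩ := pvTakeRun_sorted x b' hxb hb'
    have hxU : x ∈ U := (HM x).mpr (Or.inl (by simp))
    have hmin : ∀ k ∈ U, x ≤ k := by
      intro k hk
      rcases (HM k).mp hk with h | h <;> rcases List.mem_cons.mp h with h | h
      · exact le_of_eq h.symm
      · exact hxa k h
      · exact le_of_eq h.symm
      · exact hxb k h
    obtain ⟨U', hUeq, hU', hgtU'⟩ := pvHeadMin U x HU hxU hmin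
    subst hUeq
    have hmem' : ∀ k, k ∈ U' ↔ k ∈ (pvTakeRun x a').2 ∨ k ∈ (pvTakeRun x b').2 :=
      pvMemTail x (x :: a') (x :: b') U' _ _ HM hgtU'
        (fun k hk => pvRunMem x a' hxa ha' k hk)
        (fun k hk => pvRunMem x b' hxb hb' k hk) hpgta hpgtb
    have hrec := ih1 U' hpsa hpsb hU' hmem'
    have hcong : ∀ k ∈ U',
        ((List.count k (x :: b') : Int) - (List.count k (x :: a') : Int))
          = ((List.count k (pvTakeRun x b').2 : Int) - (List.count k (pvTakeRun x a').2 : Int)) := by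
      intro k hk
      rw [pvRunCount x a' hxa ha' k (ne_of_gt (hgtU' k hk)),
          pvRunCount x b' hxb hb' k (ne_of_gt (hgtU' k hk))]
    have hfx : ((List.count x (x :: b') : Int) - (List.count x (x :: a') : Int))
        = (((pvTakeRun x b').1 : Int) + 1) - (((pvTakeRun x a').1 : Int) + 1) := by
      simp [List.count_cons_self, hca, hcb]
    have hd1' : ¬ ((((pvTakeRun x b').1 : Int) + 1) - (((pvTakeRun x a').1 : Int) + 1) > 0) := hd1
    have hd2' : ¬ ((((pvTakeRun x b').1 : Int) + 1) - (((pvTakeRun x a').1 : Int) + 1) < 0) := hd2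
    simp only [pvMerge, if_neg hxy]
    rw [if_neg hd1', if_neg hd2', hrec, List.filter_cons, List.filter_cons,
        if_neg (by rw [decide_eq_true_eq, hfx]; omega),
        if_neg (by rw [decide_eq_true_eq, hfx]; omega),
        pvPassNeg_congr U' _ _ hcong, pvPassPos_congr U' _ _ hcong]

-- ===== VERDICT (by name: the statement is the Claim_ definition above) =====
theorem explain_multiset_mismatch_spec : Claim_equal_explain_multiset_mismatch := by
  intro need used _
  show explain_multiset_mismatch need used = explain_multiset_mismatch_alt need used
  simp only [explain_multiset_mismatch, explain_multiset_mismatch_alt]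
  rw [pvFoldAB]
  have hmemU : ∀ k, k ∈ PySem.List.sorted (PySem.Set.ofList ((PySem.Dict.counter need).keys ++ (PySem.Dict.counter used).keys)) (fun x => x)
      ↔ k ∈ PySem.List.sorted need (fun x => x) ∨ k ∈ PySem.List.sorted used (fun x => x) := by
    intro k
    simp [PySem.List.mem_sorted, PySem.Set.mem_ofList, PySem.Dict.keys_counter]
  have hspec := pvMerge_spec (PySem.List.sorted need (fun x => x)) (PySem.List.sorted used (fun x => x))
      (PySem.List.sorted (PySem.Set.ofList ((PySem.Dict.counter need).keys ++ (PySem.Dict.counter used).keys)) (fun x => x))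
      (by simpa using PySem.List.sorted_pairwise need (fun x => x))
      (by simpa using PySem.List.sorted_pairwise used (fun x => x))
      (PySem.List.sorted_ofList_pairwise_lt _) hmemU
  have hcn : ∀ k, List.count k (PySem.List.sorted need (fun x => x)) = List.count k need :=
    fun k => (PySem.List.sorted_perm need (fun x => x) false).count_eq k
  have hcu : ∀ k, List.count k (PySem.List.sorted used (fun x => x)) = List.count k used :=
    fun k => (PySem.List.sorted_perm used (fun x => x) false).count_eq k
  rw [hspec]
  simp only [hcn, hcu, pvFmt, PySem.Dict.getD_counter, List.nil_append]
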